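-- pv_equiv track=rewrite | github.com/tide-cardoso-2026/avaliacao-entrevista-candidatos-ti | app/main.py | _candidate_fragment_for_interview
-- ===== SOURCE A (Python) =====
-- def _candidate_fragment_for_interview(candidate_stem: str, interview_stems: list[str]) -> str:
--     c = candidate_stem.lower()
--     for iv in interview_stems:
--         if c in iv.lower():
--             return candidate_stem
--
--     tokens = [t for t in candidate_stem.replace("_", " ").replace("-", " ").split() if len(t) >= 3]
--     for token in sorted(tokens, key=len, reverse=True):
--         tl = token.lower()
--         for iv in interview_stems:
--             if tl in iv.lower():
--                 return token
--     return candidate_stem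
-- ===== SOURCE B (Python) =====
-- def _candidate_fragment_for_interview(candidate_stem: str, interview_stems: list[str]) -> str:
--     c = candidate_stem.lower()
--     lowered = [iv.lower() for iv in interview_stems]
--     if any(c in iv for iv in lowered):
--         return candidate_stem
--     best = None
--     for t in candidate_stem.replace("_", " ").replace("-", " ").split():
--         if len(t) >= 3 and (best is None or len(best) < len(t)):
--             tl = t.lower()
--             if any(tl in iv for iv in lowered):
--                 best = t
--     return best if best is not None else candidate_stem
-- ===== Notes on version B (the rewrite author's own statement) =====
-- stated objective: alternative
-- what changed: Phase 2 no longer sorts: B lowercases the interview stems once and makes a single pass over the raw tokens keeping a running best, testing a token against the stems only when it is strictly longer than the current best, replacing A's stable descending length-sort plus early-return double scan.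
import Mathlib
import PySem

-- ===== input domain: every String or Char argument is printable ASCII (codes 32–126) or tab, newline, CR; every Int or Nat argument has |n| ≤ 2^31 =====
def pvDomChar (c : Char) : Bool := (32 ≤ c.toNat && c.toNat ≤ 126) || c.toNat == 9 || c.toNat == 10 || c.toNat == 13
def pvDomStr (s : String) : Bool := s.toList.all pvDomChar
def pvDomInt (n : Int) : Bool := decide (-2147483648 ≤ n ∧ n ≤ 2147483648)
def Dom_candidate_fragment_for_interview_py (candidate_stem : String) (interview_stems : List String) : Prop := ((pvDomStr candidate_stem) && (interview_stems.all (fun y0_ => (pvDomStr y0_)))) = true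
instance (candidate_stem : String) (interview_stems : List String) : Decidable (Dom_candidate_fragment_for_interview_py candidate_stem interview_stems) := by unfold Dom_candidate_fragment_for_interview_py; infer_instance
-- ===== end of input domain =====

-- B avoids A's sort: it lowercases the interview stems once and makes a single pass over the
-- tokens keeping a running best, testing a token only when it is strictly longer (objective: alternative).

-- ===== PORT A =====
def candidate_fragment_for_interview_py (candidate_stem : String) (interview_stems : List String) : String :=
  let c := PySem.Str.lower candidate_stem
  -- for iv in interview_stems: if c in iv.lower(): return candidate_stem
  if interview_stems.any (fun iv => PySem.Str.isIn c (PySem.Str.lower iv)) then candidate_stem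
  else
    let tokens := (PySem.Str.split₀ (PySem.Str.replace (PySem.Str.replace candidate_stem "_" " ") "-" " ")).filter
      (fun t => 3 ≤ PySem.Str.len t)
    -- for token in sorted(tokens, key=len, reverse=True): for iv …: if tl in iv.lower(): return token
    match (PySem.List.sorted tokens PySem.Str.len true).find?
        (fun token => interview_stems.any (fun iv => PySem.Str.isIn (PySem.Str.lower token) (PySem.Str.lower iv))) with
    | some token => token
    | none => candidate_stem

-- ===== PORT B =====
def candidate_fragment_for_interview_py_alt (candidate_stem : String) (interview_stems : List String) : String :=
  let c := PySem.Str.lower candidate_stem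
  let lowered := interview_stems.map PySem.Str.lower
  if lowered.any (fun iv => PySem.Str.isIn c iv) then candidate_stem
  else
    -- best = None; for t in split: if len(t)>=3 and (best is None or len(best)<len(t)):
    --   tl = t.lower(); if any(tl in iv for iv in lowered): best = t
    let best := (PySem.Str.split₀ (PySem.Str.replace (PySem.Str.replace candidate_stem "_" " ") "-" " ")).foldl
      (fun best t =>
        if decide (3 ≤ PySem.Str.len t)
            && (match best with | none => true | some b => decide (PySem.Str.len b < PySem.Str.len t))
        then
          let tl := PySem.Str.lower t
          if lowered.any (fun iv => PySem.Str.isIn tl iv) then some t else best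
        else best) none
    best.getD candidate_stem

-- ===== PRECONDITION & SPEC =====
def Spec_candidate_fragment_for_interview_py (candidate_stem : String) (interview_stems : List String) (out : String) : Prop := out = candidate_fragment_for_interview_py_alt candidate_stem interview_stems
instance (candidate_stem : String) (interview_stems : List String) (out : String) : Decidable (Spec_candidate_fragment_for_interview_py candidate_stem interview_stems out) := by unfold Spec_candidate_fragment_for_interview_py; infer_instance

-- ===== CLAIM (what is proved, stated in full; the proofs are below) =====
def Claim_equal_candidate_fragment_for_interview_py : Prop := ∀ (candidate_stem : String) (interview_stems : List String), Dom_candidate_fragment_for_interview_py candidate_stem interview_stems → Spec_candidate_fragment_for_interview_py candidate_stem interview_stems (candidate_fragment_for_interview_py candidate_stem interview_stems)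

-- ===== LEMMAS AND PROOFS =====

-- Python's max-with-key fold step
def pvMaxStep {α κ : Type} [LT κ] [DecidableLT κ] (key : α → κ) (acc : Option α) (x : α) : Option α :=
  match acc with
  | none => some x
  | some m => if key m < key x then some x else some m

-- Finding the first match in a list after a stable insertion of x equals the Python max-step,
-- provided the list is (weakly) descending in the key.
theorem find?_insertBy_desc {α κ : Type} [LinearOrder κ] (key : α → κ) (p : α → Bool) (x : α)
    (l : List α) (h : l.Pairwise (fun a b => key b ≤ key a)) :
    (PySem.List.insertBy (fun a b => decide (key b < key a)) x l).find? p =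
      (if p x then pvMaxStep key (l.find? p) x else l.find? p) := by
  induction l with
  | nil => by_cases hx : p x <;> simp [PySem.List.insertBy, pvMaxStep, hx]
  | cons y ys ih =>
    have hy : ∀ z ∈ ys, key z ≤ key y := (List.pairwise_cons.mp h).1
    have hys : ys.Pairwise (fun a b => key b ≤ key a) := (List.pairwise_cons.mp h).2
    by_cases hlt : key y < key x
    · -- x is inserted in front
      have hins : PySem.List.insertBy (fun a b => decide (key b < key a)) x (y :: ys) = x :: y :: ys := by
        simp [PySem.List.insertBy, hlt]
      rw [hins]
      by_cases hx : p x
      · -- first match is x; any match m of y::ys has key m ≤ key y < key x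
        rw [if_pos hx]
        cases hfind : (y :: ys).find? p with
        | none => simp [hx, pvMaxStep]
        | some m =>
          have hm : m ∈ y :: ys := List.mem_of_find?_eq_some hfind
          have hle : key m ≤ key y := by
            rcases List.mem_cons.mp hm with rfl | hmem
            · exact le_refl _
            · exact hy m hmem
          simp [hx, pvMaxStep, lt_of_le_of_lt hle hlt]
      · simp [List.find?_cons, hx]
    · -- x goes after y
      have hins : PySem.List.insertBy (fun a b => decide (key b < key a)) x (y :: ys) =
          y :: PySem.List.insertBy (fun a b => decide (key b < key a)) x ys := by
        simp [PySem.List.insertBy, hlt]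
      by_cases hpy : p y
      · -- y stays the first match; the max-step cannot replace y since ¬ key y < key x
        rw [hins]
        simp [hpy, pvMaxStep, hlt]
      · have h1 : List.find? p (y :: PySem.List.insertBy (fun a b => decide (key b < key a)) x ys) =
            List.find? p (PySem.List.insertBy (fun a b => decide (key b < key a)) x ys) := by
          simp [hpy]
        have h2 : List.find? p (y :: ys) = List.find? p ys := by
          simp [hpy]
        rw [hins, h1, h2]
        exact ih hys

-- Folding stable insertions and then finding the first match equals Python's max fold.
theorem find?_foldl_insertBy {α κ : Type} [LinearOrder κ] (key : α → κ) (p : α → Bool)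
    (l : List α) (acc : List α) (h : acc.Pairwise (fun a b => key b ≤ key a)) :
    ((l.foldl (fun acc x => PySem.List.insertBy (fun a b => decide (key b < key a)) x acc) acc).find? p) =
      l.foldl (fun b x => if p x then pvMaxStep key b x else b) (acc.find? p) := by
  induction l generalizing acc with
  | nil => rfl
  | cons x xs ih =>
    simp only [List.foldl_cons]
    rw [ih _ (PySem.List.insertBy_pairwise_ge key x acc h), find?_insertBy_desc key p x acc h]

-- A's sorted-descending early-return scan equals Python's max fold over the same list.
theorem find?_sorted_rev_eq_foldl_max {α κ : Type} [LinearOrder κ] (key : α → κ) (p : α → Bool)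
    (xs : List α) :
    (PySem.List.sorted xs key true).find? p =
      xs.foldl (fun b x => if p x then pvMaxStep key b x else b) none := by
  rw [PySem.List.sorted_rev_eq_foldl_insertBy, find?_foldl_insertBy key p xs [] List.Pairwise.nil]
  rfl

-- ===== VERDICT (by name: the statement is the Claim_ definition above) =====
theorem candidate_fragment_for_interview_py_spec : Claim_equal_candidate_fragment_for_interview_py := by
  intro stem ivs _
  show candidate_fragment_for_interview_py stem ivs = candidate_fragment_for_interview_py_alt stem ivs
  simp only [candidate_fragment_for_interview_py, candidate_fragment_for_interview_py_alt,
    List.any_map, Function.comp_def]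
  by_cases h1 : (ivs.any (fun iv => PySem.Str.isIn (PySem.Str.lower stem) (PySem.Str.lower iv))) = true
  · rw [if_pos h1, if_pos h1]
  · rw [if_neg h1, if_neg h1]
    set p : String → Bool :=
      fun token => ivs.any (fun iv => PySem.Str.isIn (PySem.Str.lower token) (PySem.Str.lower iv)) with hp
    rw [find?_sorted_rev_eq_foldl_max PySem.Str.len p]
    rw [← PySem.List.foldl_ite_eq_foldl_filter (fun t => 3 ≤ PySem.Str.len t)
      (fun b x => if p x then pvMaxStep PySem.Str.len b x else b)
      (PySem.Str.split₀ (PySem.Str.replace (PySem.Str.replace stem "_" " ") "-" " ")) none]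
    have hstep : (fun (best : Option String) (t : String) =>
        if decide (3 ≤ PySem.Str.len t)
            && (match best with | none => true | some b => decide (PySem.Str.len b < PySem.Str.len t))
        then (if p t then some t else best) else best)
        = (fun (b : Option String) (x : String) =>
            if 3 ≤ PySem.Str.len x then (if p x then pvMaxStep PySem.Str.len b x else b) else b) := by
      funext b x
      cases b with
      | none => by_cases hx : p x = true <;> simp [pvMaxStep, hx]
      -- some: propositional if-shuffling
      | some m => by_cases hx : p x = true <;> simp [pvMaxStep, hx] <;> split_ifs <;> simp_all
    rw [hstep]
    cases hfold : ((PySem.Str.split₀ (PySem.Str.replace (PySem.Str.replace stem "_" " ") "-" " ")).foldl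
        (fun (b : Option String) (x : String) =>
          if 3 ≤ PySem.Str.len x then (if p x then pvMaxStep PySem.Str.len b x else b) else b) none) with
    | none => simp
    | some m => simp
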